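-- pv_equiv track=rewrite | github.com/MikenVo/PYnative-Progress | python-loop-exercise/ex22.py | find
-- ===== SOURCE A (Python) =====
-- def find(n):
--     l = list(n)
--     try:
--         int(l[0])
--     except ValueError:
--         l.remove(l[0])
--         smallest = l[0]
--         largest = l[0]
--     else:
--         smallest = l[0]
--         largest = l[0]
--
--     for i in l:
--         if smallest > i:
--             smallest = i
--
--         if largest < i:
--             largest = i
--
--     return f"Largest digit in {n}: {largest}\nSmallest digit in {n}: {smallest}"
-- ===== SOURCE B (Python) =====
-- def find(n):
--     l = list(n)
--     try:
--         int(l[0])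
--     except ValueError:
--         l = l[1:]
--     s = sorted(l)
--     return f"Largest digit in {n}: {s[-1]}\nSmallest digit in {n}: {s[0]}"
-- ===== Notes on version B (the rewrite author's own statement) =====
-- stated objective: simpler
-- what changed: Replaces the manual smallest/largest tracking loop (with its try/else duplicate initialisation and in-place remove) by trimming the first char via a slice and sorting the list once, taking the min as the first and the max as the last element of the sorted list.
import Mathlib
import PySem

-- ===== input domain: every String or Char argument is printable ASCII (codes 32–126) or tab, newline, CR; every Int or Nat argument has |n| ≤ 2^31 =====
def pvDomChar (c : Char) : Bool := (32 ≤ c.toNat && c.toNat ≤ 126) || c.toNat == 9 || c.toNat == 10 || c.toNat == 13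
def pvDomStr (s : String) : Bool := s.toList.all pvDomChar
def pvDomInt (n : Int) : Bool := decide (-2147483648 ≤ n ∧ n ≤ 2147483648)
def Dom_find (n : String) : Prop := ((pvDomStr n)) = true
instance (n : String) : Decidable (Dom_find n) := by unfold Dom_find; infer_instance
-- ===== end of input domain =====

-- B replaces A's manual smallest/largest tracking loop by a slice-trim plus one sort,
-- reading the extremes off the ends of the sorted list (objective: simpler).


-- ===== PORT A =====
-- int(c) on a single ASCII char succeeds exactly when c is '0'..'9' (Char.isDigit);
-- otherwise ValueError is caught and l.remove(l[0]) removes the first occurrence of l[0].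
def find (n : String) : String :=
  let l := n.toList
  match PySem.List.pyGet? l 0 with
  | none => ""            -- l[0] raises IndexError (empty string); outside Pre_
  | some c0 =>
    let l2 := if c0.isDigit then l else (PySem.List.remove? l c0).getD []
    match PySem.List.pyGet? l2 0 with
    | none => ""          -- l[0] after removal raises IndexError; outside Pre_
    | some s0 =>
      let p := l2.foldl (fun (p : Char × Char) i =>
        (if i < p.1 then i else p.1, if p.2 < i then i else p.2)) (s0, s0)
      "Largest digit in " ++ n ++ ": " ++ String.ofList [p.2] ++
        "\nSmallest digit in " ++ n ++ ": " ++ String.ofList [p.1]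

-- ===== PORT B =====
def find_alt (n : String) : String :=
  let l := n.toList
  let l2 := match PySem.List.pyGet? l 0 with
    | none => l           -- l[0] raises IndexError here in Python; outside Pre_
    | some c0 => if c0.isDigit then l else PySem.List.slice l (some 1) none   -- l = l[1:]
  let s := PySem.List.sorted l2 (fun x => x) false
  match PySem.List.pyGet? s (-1), PySem.List.pyGet? s 0 with
  | some lg, some sm =>
      "Largest digit in " ++ n ++ ": " ++ String.ofList [lg] ++
        "\nSmallest digit in " ++ n ++ ": " ++ String.ofList [sm]
  | _, _ => ""            -- s[-1] raises IndexError (empty after trim); outside Pre_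

-- ===== PRECONDITION & SPEC =====
-- Pre_ excludes exactly the inputs on which A raises IndexError: the empty string,
-- and single-character strings whose character is not a digit (list empty after removal).
def Pre_find (n : String) : Prop :=
  n.toList ≠ [] ∧ ((n.toList.headD 'a').isDigit = false → 2 ≤ n.toList.length)
instance (n : String) : Decidable (Pre_find n) := by unfold Pre_find; infer_instance
def pvWitness_find : String := "ba2c"

def Spec_find (n : String) (out : String) : Prop := out = find_alt n
instance (n : String) (out : String) : Decidable (Spec_find n out) := by unfold Spec_find; infer_instance

-- ===== CLAIM (what is proved, stated in full; the proofs are below) =====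
def Claim_equal_find : Prop := ∀ (n : String), Dom_find n → Pre_find n → Spec_find n (find n)

-- ===== LEMMAS AND PROOFS =====

-- A's fold computes (foldl min, foldl max) componentwise.
lemma fold_pair_eq (m : List Char) : ∀ a b : Char,
    m.foldl (fun (p : Char × Char) i =>
      (if i < p.1 then i else p.1, if p.2 < i then i else p.2)) (a, b)
      = (m.foldl min a, m.foldl max b) := by
  induction m with
  | nil => intro a b; rfl
  | cons x t ih =>
    intro a b
    simp only [List.foldl_cons, ih]
    congr 1
    · rcases lt_or_ge x a with h | h
      · simp [h, le_of_lt h]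
      · simp [not_lt.mpr h, h]
    · rcases lt_or_ge b x with h | h
      · simp [h, le_of_lt h]
      · simp [not_lt.mpr h, h]

lemma foldl_min_le_init : ∀ (t : List Char) (a : Char), t.foldl min a ≤ a := by
  intro t
  induction t with
  | nil => intro a; exact le_rfl
  | cons z u ihu => intro a; exact le_trans (ihu (min a z)) (min_le_left _ _)

lemma le_foldl_max_init : ∀ (t : List Char) (b : Char), b ≤ t.foldl max b := by
  intro t
  induction t with
  | nil => intro b; exact le_rfl
  | cons z u ihu => intro b; exact le_trans (le_max_left _ _) (ihu (max b z))

lemma foldl_min_le (m : List Char) : ∀ a : Char, ∀ x ∈ m, m.foldl min a ≤ x := by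
  induction m with
  | nil => intro a x hx; cases hx
  | cons y t ih =>
    intro a x hx
    rcases List.mem_cons.mp hx with hx | hx
    · subst hx
      calc t.foldl min (min a x) ≤ min a x := foldl_min_le_init t (min a x)
        _ ≤ x := min_le_right _ _
    · exact ih (min a y) x hx

lemma foldl_min_mem (m : List Char) : ∀ a : Char, m.foldl min a = a ∨ m.foldl min a ∈ m := by
  induction m with
  | nil => intro a; exact Or.inl rfl
  | cons y t ih =>
    intro a
    simp only [List.foldl_cons]
    rcases ih (min a y) with h | h
    · rcases min_choice a y with hc | hc
      · exact Or.inl (h.trans hc)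
      · exact Or.inr (List.mem_cons.mpr (Or.inl (h.trans hc)))
    · exact Or.inr (List.mem_cons.mpr (Or.inr h))

lemma le_foldl_max (m : List Char) : ∀ b : Char, ∀ x ∈ m, x ≤ m.foldl max b := by
  induction m with
  | nil => intro b x hx; cases hx
  | cons y t ih =>
    intro b x hx
    rcases List.mem_cons.mp hx with hx | hx
    · subst hx
      calc x ≤ max b x := le_max_right _ _
        _ ≤ t.foldl max (max b x) := le_foldl_max_init t (max b x)
    · exact ih (max b y) x hx

lemma foldl_max_mem (m : List Char) : ∀ b : Char, m.foldl max b = b ∨ m.foldl max b ∈ m := by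
  induction m with
  | nil => intro b; exact Or.inl rfl
  | cons y t ih =>
    intro b
    simp only [List.foldl_cons]
    rcases ih (max b y) with h | h
    · rcases max_choice b y with hc | hc
      · exact Or.inl (h.trans hc)
      · exact Or.inr (List.mem_cons.mpr (Or.inl (h.trans hc)))
    · exact Or.inr (List.mem_cons.mpr (Or.inr h))

-- last element of the sorted list is an upper bound of the original list
lemma getLast_sorted_ge (m : List Char) (h : m ≠ []) (x : Char) (hx : x ∈ m) :
    x ≤ (PySem.List.sorted m (fun c => c) false).getLast
      (by simpa [PySem.List.sorted_eq_nil_iff] using h) := by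
  have hmem : x ∈ PySem.List.sorted m (fun c => c) false :=
    (PySem.List.mem_sorted m (fun c => c) false x).mpr hx
  obtain ⟨p, hp, hpe⟩ := List.mem_iff_getElem.mp hmem
  have hsne : PySem.List.sorted m (fun c => c) false ≠ [] := by
    simpa [PySem.List.sorted_eq_nil_iff] using h
  have hpos : 0 < (PySem.List.sorted m (fun c => c) false).length :=
    List.length_pos_iff.mpr hsne
  have hmono := PySem.List.sorted_id_getElem_mono m
    (p := p) (q := (PySem.List.sorted m (fun c => c) false).length - 1)
    (by omega) (by omega)
  rw [List.getLast_eq_getElem]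
  rw [hpe] at hmono
  exact hmono

-- head of the sorted list equals A's fold-minimum, last equals A's fold-maximum
lemma sorted_ends (m : List Char) (s0 : Char) (hhead : m.headD 'a' = s0) (h : m ≠ []) :
    PySem.List.pyGet? (PySem.List.sorted m (fun c => c) false) 0 = some (m.foldl min s0) ∧
    PySem.List.pyGet? (PySem.List.sorted m (fun c => c) false) (-1) = some (m.foldl max s0) := by
  have hsne : PySem.List.sorted m (fun c => c) false ≠ [] := by
    simpa [PySem.List.sorted_eq_nil_iff] using h
  have hs0m : s0 ∈ m := by
    cases m with
    | nil => exact absurd rfl h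
    | cons y t => simp at hhead; simp [← hhead]
  obtain ⟨hd, tl, hcons⟩ := List.exists_cons_of_ne_nil hsne
  have hhd_le : ∀ y ∈ m, hd ≤ y :=
    PySem.List.key_head_sorted_le m (fun c => c) hcons
  have hhd_mem : hd ∈ m := by
    have : hd ∈ PySem.List.sorted m (fun c => c) false := by simp [hcons]
    exact (PySem.List.mem_sorted m (fun c => c) false hd).mp this
  have hmin : m.foldl min s0 = hd := by
    apply le_antisymm (foldl_min_le m s0 hd hhd_mem)
    apply hhd_le
    rcases foldl_min_mem m s0 with h1 | h1
    · rwa [h1]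
    · exact h1
  have hmax : m.foldl max s0 = (PySem.List.sorted m (fun c => c) false).getLast hsne := by
    apply le_antisymm
    · rcases foldl_max_mem m s0 with h1 | h1
      · rw [h1]; exact getLast_sorted_ge m h s0 hs0m
      · exact getLast_sorted_ge m h _ h1
    · have hlmem : (PySem.List.sorted m (fun c => c) false).getLast hsne ∈ m :=
        (PySem.List.mem_sorted m (fun c => c) false _).mp (List.getLast_mem hsne)
      exact le_foldl_max m s0 _ hlmem
  refine ⟨?_, ?_⟩
  · rw [hcons, PySem.List.pyGet?_zero_cons, hmin]
  · rw [PySem.List.pyGet?_neg_one, hmax, List.getLast?_eq_some_getLast]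

-- ===== VERDICT (by name: the statement is the Claim_ definition above) =====
theorem find_spec : Claim_equal_find := by
  intro n _ hpre
  obtain ⟨hne, hlen⟩ := hpre
  unfold Spec_find find find_alt
  obtain ⟨c0, rest, hl⟩ := List.exists_cons_of_ne_nil hne
  simp only [hl, PySem.List.pyGet?_zero_cons]
  by_cases hd : c0.isDigit
  · -- first char is a digit: no trimming on either side
    simp only [hd, if_true, PySem.List.pyGet?_zero_cons]
    obtain ⟨h0, hneg⟩ := sorted_ends (c0 :: rest) c0 (by simp) (by simp)
    rw [fold_pair_eq, h0, hneg]
  · -- first char is not a digit: it is removed; the list must still be nonempty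
    have hrest : rest ≠ [] := by
      have := hlen (by simp [hl, hd])
      simp only [hl, List.length_cons] at this
      intro hc; subst hc; simp at this
    simp only [hd, if_neg, Bool.false_eq_true, not_false_iff,
      PySem.List.remove?_cons_self, Option.getD_some, PySem.List.slice_from_one, List.tail_cons]
    obtain ⟨s0, rest', hr⟩ := List.exists_cons_of_ne_nil hrest
    subst hr
    simp only [PySem.List.pyGet?_zero_cons]
    obtain ⟨h0, hneg⟩ := sorted_ends (s0 :: rest') s0 (by simp) (by simp)
    rw [fold_pair_eq, h0, hneg]
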